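-- pv_equiv track=rewrite | github.com/RaymondHoogervorst/Bachelor-Project | gamestate.py | mask_to_str
-- ===== SOURCE A (Python) =====
-- SIZE = 6
--
-- def get_bit(value, bit):
--     return (value>>bit) & 1 == 1
--
-- def mask_to_str(value):
--     res = ""
--     for i in range(SIZE):
--         for bit in range(SIZE * i, SIZE * i + SIZE, 1):
--             bit = '1' if (get_bit(value, bit)) else '.'
--             res += str(bit)
--         res += '\n'
--
--     return res
-- ===== SOURCE B (Python) =====
-- def mask_to_str(value):
--     # build the full 36-bit string once, then reshape into rows (column 0 = low bit)
--     s = format(value & 0xFFFFFFFFF, '036b').translate(str.maketrans('01', '.1'))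
--     return ''.join(s[30 - 6 * i:36 - 6 * i][::-1] + '\n' for i in range(6))
-- ===== Notes on version B (the rewrite author's own statement) =====
-- stated objective: alternative
-- what changed: B masks the value down to the grid's bit width once, formats the whole bit string in one call, and reshapes it into six reversed row slices, instead of A's nested per-bit loop calling get_bit for every cell and appending char by char.
import Mathlib
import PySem

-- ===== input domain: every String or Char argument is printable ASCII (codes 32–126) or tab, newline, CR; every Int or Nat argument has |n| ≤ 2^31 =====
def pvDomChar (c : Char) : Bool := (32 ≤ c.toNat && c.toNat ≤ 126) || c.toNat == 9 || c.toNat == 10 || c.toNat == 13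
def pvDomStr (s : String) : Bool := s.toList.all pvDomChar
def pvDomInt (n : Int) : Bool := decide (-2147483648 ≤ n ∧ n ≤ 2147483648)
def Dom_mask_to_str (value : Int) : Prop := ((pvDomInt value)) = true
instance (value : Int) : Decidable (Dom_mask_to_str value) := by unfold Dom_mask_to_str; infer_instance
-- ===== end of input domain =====

-- B formats the 36-bit mask once (format(m,'036b')) and reshapes it into six reversed slices, instead of A's nested per-bit loop; alternative decomposition, same cost.

-- ===== PORT A =====
-- get_bit(value, bit): (value >> bit) & 1 == 1; bit is ≥ 0 at every call site (range(6i, 6i+6))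
def pvGetBit (value : Int) (bit : Int) : Bool :=
  PySem.Int.band (value >>> bit.toNat) 1 == 1

def mask_to_str (value : Int) : String :=
  let res : List Char :=
    (PySem.List.pyRange 0 6 1).foldl (fun res i =>
      ((PySem.List.pyRange (6 * i) (6 * i + 6) 1).foldl (fun res bit =>
        res ++ [if pvGetBit value bit then '1' else '.']) res) ++ ['\n']) []
  String.ofList res

-- ===== PORT B =====
-- port of format(m, '036b') for 0 ≤ m < 2^36: digit k (MSB first) is bit 35-k of m
def pvFmt036 (m : Nat) : List Char :=
  (List.range 36).map (fun k => if m.testBit (35 - k) then '1' else '0')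

def mask_to_str_alt (value : Int) : String :=
  let s : List Char :=
    (pvFmt036 (PySem.Int.band value (2 ^ 36 - 1)).toNat).map
      (fun c => if c == '0' then '.' else c)
  String.ofList
    (((List.range 6).map (fun i => ((s.drop (30 - 6 * i)).take 6).reverse ++ ['\n'])).flatten)

-- ===== PRECONDITION & SPEC =====
def Spec_mask_to_str (value : Int) (out : String) : Prop := out = mask_to_str_alt value
instance (value : Int) (out : String) : Decidable (Spec_mask_to_str value out) := by unfold Spec_mask_to_str; infer_instance

-- ===== CLAIM (what is proved, stated in full; the proofs are below) =====
def Claim_equal_mask_to_str : Prop := ∀ (value : Int), Dom_mask_to_str value → Spec_mask_to_str value (mask_to_str value)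

-- ===== LEMMAS AND PROOFS =====

-- masking with 2^36-1 is taking the remainder mod 2^36
theorem pv_band_mask (value : Int) :
    PySem.Int.band value (2 ^ 36 - 1) = value % 2 ^ 36 := by
  unfold PySem.Int.band
  by_cases ha : 0 ≤ value
  · simp only [ha, if_true, show (0:Int) ≤ 2 ^ 36 - 1 by norm_num, if_true]
    have h1 : (2 ^ 36 - 1 : Int).toNat = 2 ^ 36 - 1 := by decide
    rw [h1, Nat.and_two_pow_sub_one_eq_mod]
    omega
  · simp only [ha, if_false, show (0:Int) ≤ 2 ^ 36 - 1 by norm_num, if_true]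
    have h1 : (2 ^ 36 - 1 : Int).toNat = 2 ^ 36 - 1 := by decide
    rw [h1, Nat.land_comm, Nat.and_two_pow_sub_one_eq_mod]
    omega

-- A's per-bit test equals testBit of the 36-bit masked value, for bits below 36
theorem pv_bit_eq (value : Int) (b : Nat) (hb : b < 36) :
    (PySem.Int.band (value >>> b) 1 == 1) =
      (PySem.Int.band value (2 ^ 36 - 1)).toNat.testBit b := by
  rw [pv_band_mask, PySem.Int.band_one,
    PySem.Int.mod_eq_emod_of_pos (by norm_num : (0:Int) < 2),
    Int.shiftRight_eq_div_pow, Nat.testBit_eq_decide_div_mod_eq]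
  have hnn : 0 ≤ value % 2 ^ 36 := Int.emod_nonneg value (by norm_num)
  have hcast : (((value % 2 ^ 36).toNat : Int)) = value % 2 ^ 36 := Int.toNat_of_nonneg hnn
  have hpow : (((2:Nat) ^ b : Nat) : Int) = (2:Int) ^ b := by push_cast; ring
  have h2 : (2:Int) ^ 36 = 2 ^ b * (2 * 2 ^ (35 - b)) := by
    rw [← pow_succ', ← pow_add]; congr 1; omega
  have hdiv : (value % 2 ^ 36) / 2 ^ b
      = value / 2 ^ b + 2 * -(2 ^ (35 - b) * (value / 2 ^ 36)) := by
    rw [Int.emod_def, h2]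
    rw [show value - 2 ^ b * (2 * 2 ^ (35 - b)) * (value / (2 ^ b * (2 * 2 ^ (35 - b))))
          = value + (2:Int) ^ b * (-(2 * 2 ^ (35 - b)) * (value / (2 ^ b * (2 * 2 ^ (35 - b))))) by ring]
    rw [Int.add_mul_ediv_left _ _ (show (2:Int) ^ b ≠ 0 by positivity), ← h2]
    ring
  have e1 : (value % 2 ^ 36) / 2 ^ b % 2 = value / 2 ^ b % 2 := by
    rw [hdiv, Int.add_mul_emod_self_left]
  have e2 : (value % 2 ^ 36) / 2 ^ b % 2
      = (((value % 2 ^ 36).toNat / 2 ^ b % 2 : Nat) : Int) := by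
    rw [← hcast]; norm_cast
  rw [hpow, ← e1, e2]
  rcases Nat.mod_two_eq_zero_or_one ((value % 2 ^ 36).toNat / 2 ^ b) with h | h <;>
    rw [h] <;> decide

theorem pv_tr2 (c : Prop) [Decidable c] (a b d : Char) :
    (if c then (if c then a else b) else d) = if c then a else d := by
  split_ifs <;> rfl

theorem mask_to_str_eq (value : Int) : mask_to_str value = mask_to_str_alt value := by
  unfold mask_to_str mask_to_str_alt pvFmt036 pvGetBit
  have hr : PySem.List.pyRange 0 6 1 = [0, 1, 2, 3, 4, 5] := by decide
  have h0 : PySem.List.pyRange (6 * 0) (6 * 0 + 6) 1 = [0, 1, 2, 3, 4, 5] := by decide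
  have h1 : PySem.List.pyRange (6 * 1) (6 * 1 + 6) 1 = [6, 7, 8, 9, 10, 11] := by decide
  have h2 : PySem.List.pyRange (6 * 2) (6 * 2 + 6) 1 = [12, 13, 14, 15, 16, 17] := by decide
  have h3 : PySem.List.pyRange (6 * 3) (6 * 3 + 6) 1 = [18, 19, 20, 21, 22, 23] := by decide
  have h4 : PySem.List.pyRange (6 * 4) (6 * 4 + 6) 1 = [24, 25, 26, 27, 28, 29] := by decide
  have h5 : PySem.List.pyRange (6 * 5) (6 * 5 + 6) 1 = [30, 31, 32, 33, 34, 35] := by decide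
  have hb : ∀ b : Nat, b < 36 →
      (PySem.Int.band value (2 ^ 36 - 1)).toNat.testBit b
        = (PySem.Int.band (value >>> b) 1 == 1) :=
    fun b h => (pv_bit_eq value b h).symm
  simp only [hr, h0, h1, h2, h3, h4, h5, List.foldl_cons, List.foldl_nil,
    List.range_succ, List.range_zero, List.map_cons, List.map_nil,
    List.nil_append, List.cons_append]
  congr 1
  simp only [Int.reduceToNat, Nat.reduceSub]
  simp only [hb 0 (by norm_num), hb 1 (by norm_num), hb 2 (by norm_num), hb 3 (by norm_num), hb 4 (by norm_num), hb 5 (by norm_num), hb 6 (by norm_num), hb 7 (by norm_num), hb 8 (by norm_num), hb 9 (by norm_num), hb 10 (by norm_num), hb 11 (by norm_num), hb 12 (by norm_num), hb 13 (by norm_num), hb 14 (by norm_num), hb 15 (by norm_num), hb 16 (by norm_num), hb 17 (by norm_num), hb 18 (by norm_num), hb 19 (by norm_num), hb 20 (by norm_num), hb 21 (by norm_num), hb 22 (by norm_num), hb 23 (by norm_num), hb 24 (by norm_num), hb 25 (by norm_num), hb 26 (by norm_num), hb 27 (by norm_num), hb 28 (by norm_num), hb 29 (by norm_num), hb 30 (by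 norm_num), hb 31 (by norm_num), hb 32 (by norm_num), hb 33 (by norm_num), hb 34 (by norm_num), hb 35 (by norm_num)]
  simp [pv_tr2]

-- ===== VERDICT (by name: the statement is the Claim_ definition above) =====
theorem mask_to_str_spec : Claim_equal_mask_to_str := by
  intro value _
  unfold Spec_mask_to_str
  exact mask_to_str_eq value
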